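-- pv_equiv track=rewrite | github.com/manutece/juegobasicopython | funcionesVACIAS.py | puntos
-- ===== SOURCE A (Python) =====
-- def puntos(candidata):
--     voc = 0
--     consonante = 0
--     consonanteDF = 0
--     for i in candidata:
--         if i in "aeiouAEIOU":
--             voc = voc + 1
--         elif i in "bcdfghlmnprstv":
--             consonante = consonante + 1
--         elif i in "jkqwxyzJKQWXYZ":
--             consonanteDF = consonanteDF + 1
--     puntaje=(voc*1)+(consonante*2)+(consonanteDF*5)
--     return puntaje
-- ===== SOURCE B (Python) =====
-- def puntos(candidata):
--     # Histogram approach: count character frequencies in one pass,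
--     # then sum weight * frequency over the 37 scoring letters.
--     freq = {}
--     for ch in candidata:
--         freq[ch] = freq.get(ch, 0) + 1
--     total = 0
--     for grupo, w in (("aeiouAEIOU", 1), ("bcdfghlmnprstv", 2), ("jkqwxyzJKQWXYZ", 5)):
--         for c in grupo:
--             total += w * freq.get(c, 0)
--     return total
-- ===== Notes on version B (the rewrite author's own statement) =====
-- stated objective: alternative
-- what changed: B first builds a character-frequency histogram of the input in a single counting pass and then computes the score as a weighted sum of the frequencies of the 37 scoring letters, instead of A's per-character three-way classification into three running class counters combined at the end.
import Mathlib
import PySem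

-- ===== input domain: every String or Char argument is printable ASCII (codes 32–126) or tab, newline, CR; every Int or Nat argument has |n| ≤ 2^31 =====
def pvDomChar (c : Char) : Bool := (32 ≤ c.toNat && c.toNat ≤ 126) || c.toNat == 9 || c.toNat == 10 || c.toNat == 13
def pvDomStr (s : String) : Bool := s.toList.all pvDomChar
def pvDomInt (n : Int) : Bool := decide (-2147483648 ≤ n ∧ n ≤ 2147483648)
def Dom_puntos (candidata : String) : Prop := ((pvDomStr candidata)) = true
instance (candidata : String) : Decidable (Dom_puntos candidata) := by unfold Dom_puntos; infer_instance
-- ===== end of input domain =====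

-- B scores via a one-pass character-frequency histogram followed by a weighted sum over the 37 scoring letters, instead of A's per-character three-way classification (objective: alternative).


-- ===== PORT A =====
def puntos (candidata : String) : Int :=
  let st := candidata.toList.foldl
    (fun (acc : Int × Int × Int) i =>
      if "aeiouAEIOU".toList.contains i then (acc.1 + 1, acc.2.1, acc.2.2)
      else if "bcdfghlmnprstv".toList.contains i then (acc.1, acc.2.1 + 1, acc.2.2)
      else if "jkqwxyzJKQWXYZ".toList.contains i then (acc.1, acc.2.1, acc.2.2 + 1)
      else acc)
    (0, 0, 0)
  st.1 * 1 + st.2.1 * 2 + st.2.2 * 5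

-- ===== PORT B =====
-- each grupo string is iterated character by character, so it is carried as its character list
def pvGroups : List (List Char × Int) :=
  [("aeiouAEIOU".toList, 1), ("bcdfghlmnprstv".toList, 2), ("jkqwxyzJKQWXYZ".toList, 5)]

def puntos_alt (candidata : String) : Int :=
  let freq : PySem.Dict Char Int :=
    candidata.toList.foldl (fun d ch => d.insert ch (d.getD ch 0 + 1)) PySem.Dict.empty
  pvGroups.foldl (fun total gw =>
    gw.1.foldl (fun t c => t + gw.2 * freq.getD c 0) total) 0

-- ===== PRECONDITION & SPEC =====
def Spec_puntos (candidata : String) (out : Int) : Prop := out = puntos_alt candidata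
instance (candidata : String) (out : Int) : Decidable (Spec_puntos candidata out) := by unfold Spec_puntos; infer_instance

-- ===== CLAIM (what is proved, stated in full; the proofs are below) =====
def Claim_equal_puntos : Prop := ∀ (candidata : String), Dom_puntos candidata → Spec_puntos candidata (puntos candidata)

-- ===== LEMMAS AND PROOFS =====
-- A's per-character score as an if-chain (the shape of A's branches)
def pvW (c : Char) : Int :=
  if "aeiouAEIOU".toList.contains c then 1
  else if "bcdfghlmnprstv".toList.contains c then 2
  else if "jkqwxyzJKQWXYZ".toList.contains c then 5 else 0

-- the 37 scoring letters with their weights, flattened (= pvGroups unrolled)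
def pvPairs : List (Char × Int) :=
  [('a',1),('e',1),('i',1),('o',1),('u',1),('A',1),('E',1),('I',1),('O',1),('U',1),
   ('b',2),('c',2),('d',2),('f',2),('g',2),('h',2),('l',2),('m',2),('n',2),('p',2),('r',2),('s',2),('t',2),('v',2),
   ('j',5),('k',5),('q',5),('w',5),('x',5),('y',5),('z',5),('J',5),('K',5),('Q',5),('W',5),('X',5),('Y',5),('Z',5)]

def pvG (x : Char) : Int := (pvPairs.map (fun p => if p.1 == x then p.2 else 0)).sum

set_option maxRecDepth 8192 in
theorem pvG_fin : ∀ n : Fin 128, pvG (Char.ofNat n.val) = pvW (Char.ofNat n.val) := by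
  decide

theorem pvG_eq (c : Char) (h : c.toNat < 128) : pvG c = pvW c := by
  simpa [Char.ofNat_toNat] using pvG_fin ⟨c.toNat, h⟩

theorem pvGroups_eq : pvGroups =
    [(['a','e','i','o','u','A','E','I','O','U'], 1),
     (['b','c','d','f','g','h','l','m','n','p','r','s','t','v'], 2),
     (['j','k','q','w','x','y','z','J','K','Q','W','X','Y','Z'], 5)] := by decide

-- B unrolled: the nested literal folds are the weighted sum of the 37 counts
theorem puntos_alt_eq (s : String) :
    puntos_alt s = (pvPairs.map (fun p => p.2 * (s.toList.count p.1 : Int))).sum := by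
  have hfreq : ∀ c : Char,
      (s.toList.foldl (fun d ch => d.insert ch (d.getD ch 0 + 1))
        (PySem.Dict.empty : PySem.Dict Char Int)).getD c 0 = (s.toList.count c : Int) := by
    intro c
    simpa using PySem.Dict.getD_foldl_insert_add_one (l := s.toList)
      (d := (PySem.Dict.empty : PySem.Dict Char Int)) (v := c)
  simp only [puntos_alt, pvGroups_eq, pvPairs, List.foldl, List.map, List.sum_cons, List.sum_nil]
  simp only [hfreq]
  ring

-- splitting off the head character from every count in a weighted count-sum
theorem pv_count_cons (ps : List (Char × Int)) (x : Char) (xs : List Char) :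
    (ps.map (fun p => p.2 * ((x :: xs).count p.1 : Int))).sum
      = (ps.map (fun p => if p.1 == x then p.2 else 0)).sum
        + (ps.map (fun p => p.2 * (xs.count p.1 : Int))).sum := by
  induction ps with
  | nil => simp
  | cons p ps ih =>
    simp only [List.map_cons, List.sum_cons, ih]
    by_cases hp : p.1 = x
    · rw [hp, List.count_cons_self]
      simp only [beq_self_eq_true, if_true]
      push_cast
      ring
    · have hp' : ¬x = p.1 := fun h => hp h.symm
      simp only [List.count_cons, beq_iff_eq, hp, hp', if_false]
      ring_nf

-- the weighted count-sum equals the per-character score sum, for in-domain strings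
theorem pv_flat (l : List Char) (h : l.all pvDomChar) :
    (pvPairs.map (fun p => p.2 * (l.count p.1 : Int))).sum = (l.map pvW).sum := by
  induction l with
  | nil => simp
  | cons x xs ih =>
    simp only [List.all_cons, Bool.and_eq_true] at h
    have hx : x.toNat < 128 := by
      simp only [pvDomChar, Bool.or_eq_true, Bool.and_eq_true, decide_eq_true_eq, beq_iff_eq] at h
      omega
    rw [pv_count_cons, ih h.2, List.map_cons, List.sum_cons, ← pvG_eq x hx]
    rfl

-- A's loop step and final scoring, named for the invariant proof
def pvStep (acc : Int × Int × Int) (i : Char) : Int × Int × Int :=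
  if "aeiouAEIOU".toList.contains i then (acc.1 + 1, acc.2.1, acc.2.2)
  else if "bcdfghlmnprstv".toList.contains i then (acc.1, acc.2.1 + 1, acc.2.2)
  else if "jkqwxyzJKQWXYZ".toList.contains i then (acc.1, acc.2.1, acc.2.2 + 1)
  else acc

def pvScore (t : Int × Int × Int) : Int := t.1 * 1 + t.2.1 * 2 + t.2.2 * 5

-- A's loop invariant: the three counters started at (v, co, d) score v+2co+5d plus the per-character sum
theorem pv_loop (l : List Char) (v co d : Int) :
    pvScore (l.foldl pvStep (v, co, d))
    = v * 1 + co * 2 + d * 5 + (l.map pvW).sum := by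
  induction l generalizing v co d with
  | nil => simp [pvScore]
  | cons x xs ih =>
    simp only [List.foldl_cons, List.map_cons, List.sum_cons]
    by_cases h1 : "aeiouAEIOU".toList.contains x = true
    · rw [show pvW x = 1 from by unfold pvW; rw [if_pos h1],
        show pvStep (v, co, d) x = (v + 1, co, d) from by simp only [pvStep]; rw [if_pos h1], ih]
      ring
    · by_cases h2 : "bcdfghlmnprstv".toList.contains x = true
      · rw [show pvW x = 2 from by unfold pvW; rw [if_neg h1, if_pos h2],
          show pvStep (v, co, d) x = (v, co + 1, d) from by simp only [pvStep]; rw [if_neg h1, if_pos h2], ih]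
        ring
      · by_cases h3 : "jkqwxyzJKQWXYZ".toList.contains x = true
        · rw [show pvW x = 5 from by unfold pvW; rw [if_neg h1, if_neg h2, if_pos h3],
            show pvStep (v, co, d) x = (v, co, d + 1) from by simp only [pvStep]; rw [if_neg h1, if_neg h2, if_pos h3], ih]
          ring
        · rw [show pvW x = 0 from by unfold pvW; rw [if_neg h1, if_neg h2, if_neg h3],
            show pvStep (v, co, d) x = (v, co, d) from by simp only [pvStep]; rw [if_neg h1, if_neg h2, if_neg h3], ih]
          ring

theorem puntos_eq_score (s : String) : puntos s = pvScore (s.toList.foldl pvStep (0, 0, 0)) := rfl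

-- ===== VERDICT (by name: the statement is the Claim_ definition above) =====
theorem puntos_spec : Claim_equal_puntos := by
  intro s hdom
  unfold Spec_puntos
  rw [puntos_eq_score, pv_loop s.toList 0 0 0, puntos_alt_eq, pv_flat s.toList hdom]
  ring
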